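-- pv_equiv track=rewrite | github.com/DragonKyro/LeetCode | problems/1807_evaluate_the_bracket_pairs_of_a_string/solution.py | evaluate
-- ===== SOURCE A (Python) =====
-- from typing import List
--
-- def evaluate(s: str, knowledge: List[List[str]]) -> str:
--     d = {k: v for k, v in knowledge}
--     result = []
--     i = 0
--     while i < len(s):
--         if s[i] == '(':
--             j = s.index(')', i)
--             key = s[i+1:j]
--             result.append(d.get(key, '?'))
--             i = j + 1
--         else:
--             result.append(s[i])
--             i += 1
--     return ''.join(result)
-- ===== SOURCE B (Python) =====
-- def evaluate(s, knowledge):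
--     d = {k: v for k, v in knowledge}
--     out = []
--     buf = []
--     inside = False
--     for ch in s:
--         if inside:
--             if ch == ')':
--                 out.append(d.get(''.join(buf), '?'))
--                 buf = []
--                 inside = False
--             else:
--                 buf.append(ch)
--         elif ch == '(':
--             inside = True
--         else:
--             out.append(ch)
--     if inside:
--         raise ValueError("unterminated '(' in s")
--     return ''.join(out)
-- ===== Notes on version B (the rewrite author's own statement) =====
-- stated objective: alternative
-- what changed: Replaced A's index-jumping while loop (s.index(')') plus slicing to extract each key) with a single character-by-character state machine that keeps an 'inside brackets' flag and a key buffer.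
import Mathlib
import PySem

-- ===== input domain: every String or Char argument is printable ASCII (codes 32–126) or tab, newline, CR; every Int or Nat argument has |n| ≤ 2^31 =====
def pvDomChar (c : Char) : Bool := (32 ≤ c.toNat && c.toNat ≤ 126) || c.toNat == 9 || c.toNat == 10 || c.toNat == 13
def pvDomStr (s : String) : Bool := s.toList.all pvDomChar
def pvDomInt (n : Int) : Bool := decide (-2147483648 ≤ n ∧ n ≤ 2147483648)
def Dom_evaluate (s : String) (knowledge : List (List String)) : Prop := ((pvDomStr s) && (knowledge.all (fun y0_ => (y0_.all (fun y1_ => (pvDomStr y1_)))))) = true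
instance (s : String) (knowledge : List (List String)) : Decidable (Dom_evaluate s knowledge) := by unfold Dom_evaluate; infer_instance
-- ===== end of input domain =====

-- B replaces A's index-jumping while loop (s.index + slicing) by a single-pass state machine
-- with an 'inside' flag and a key buffer; objective: alternative decomposition, same O(n) cost.

-- d = {k: v for k, v in knowledge} — shared by both ports (both Pythons build it identically);
-- rows not of length 2 make Python raise (excluded by Pre_), the `_ => d` arm is that raise path.
def pvBuildDict (knowledge : List (List String)) : PySem.Dict String String :=
  knowledge.foldl (fun d row => match row with | [k, v] => d.insert k v | _ => d) PySem.Dict.empty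

-- ===== PORT A =====
-- while loop over s: on '(' take s[i+1:j] where j = s.index(')', i) (rendered as
-- takeWhile/dropWhile on the suffix, exactly the slice up to the first ')'), else copy the char.
-- The `else []` arm is Python's ValueError from s.index when no ')' follows (excluded by Pre_).
def pvLoopA (d : PySem.Dict String String) : List Char → List (List Char)
  | [] => []
  | c :: rest =>
    if c = '(' then
      if ')' ∈ rest then
        (d.getD (String.ofList (rest.takeWhile (· ≠ ')'))) "?").toList
          :: pvLoopA d ((rest.dropWhile (· ≠ ')')).tail)
      else []
    else [c] :: pvLoopA d rest
termination_by cs => cs.length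
decreasing_by
  · have h1 : (rest.dropWhile (· ≠ ')')).length ≤ rest.length := List.length_dropWhile_le _ _
    have h2 : ((rest.dropWhile (· ≠ ')')).tail).length = (rest.dropWhile (· ≠ ')')).length - 1 := List.length_tail
    simp only [List.length_cons]; omega
  · simp

def evaluate (s : String) (knowledge : List (List String)) : String :=
  String.ofList (PySem.Chars.join [] (pvLoopA (pvBuildDict knowledge) s.toList))

-- ===== PORT B =====
-- one step of B's for loop; state = (inside, buf, out)
def pvStepB (d : PySem.Dict String String)
    (st : Bool × List Char × List (List Char)) (c : Char) :
    Bool × List Char × List (List Char) :=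
  match st with
  | (inside, buf, out) =>
    if inside then
      if c = ')' then (false, [], out ++ [(d.getD (String.ofList buf) "?").toList])
      else (true, buf ++ [c], out)
    else if c = '(' then (true, [], out)
    else (false, buf, out ++ [[c]])

def evaluate_alt (s : String) (knowledge : List (List String)) : String :=
  let d := pvBuildDict knowledge
  let st := s.toList.foldl (pvStepB d) (false, [], [])
  -- st.1 = true is Python's explicit ValueError (excluded by Pre_)
  if st.1 then "" else String.ofList (PySem.Chars.join [] st.2.2)

-- ===== PRECONDITION & SPEC =====
-- Pre_ excludes exactly the inputs where the Python A raises ValueError: a knowledge row that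
-- is not a [key, value] pair (unpacking error), or a '(' in s with no ')' anywhere after it
-- (s.index failure). B raises ValueError on the same inputs.
def pvBal : List Char → Bool
  | [] => true
  | c :: rest => (c ≠ '(' || rest.contains ')') && pvBal rest

def Pre_evaluate (s : String) (knowledge : List (List String)) : Prop :=
  (∀ row ∈ knowledge, row.length = 2) ∧ pvBal s.toList = true
instance (s : String) (knowledge : List (List String)) : Decidable (Pre_evaluate s knowledge) := by
  unfold Pre_evaluate; infer_instance

def pvWitness_evaluate : String × List (List String) := ("(name)is(age)yearsold", [["name", "bob"], ["age", "two"]])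

def Spec_evaluate (s : String) (knowledge : List (List String)) (out : String) : Prop := out = evaluate_alt s knowledge
instance (s : String) (knowledge : List (List String)) (out : String) : Decidable (Spec_evaluate s knowledge out) := by unfold Spec_evaluate; infer_instance

-- ===== CLAIM (what is proved, stated in full; the proofs are below) =====
def Claim_equal_evaluate : Prop := ∀ (s : String) (knowledge : List (List String)), Dom_evaluate s knowledge → Pre_evaluate s knowledge → Spec_evaluate s knowledge (evaluate s knowledge)

-- ===== LEMMAS AND PROOFS =====

theorem pvBal_cons {c : Char} {rest : List Char} (h : pvBal (c :: rest) = true) :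
    pvBal rest = true := by
  simp [pvBal, Bool.and_eq_true] at h; exact h.2

theorem pvBal_append {a b : List Char} (h : pvBal (a ++ b) = true) : pvBal b = true := by
  induction a with
  | nil => exact h
  | cons c cs ih => exact ih (pvBal_cons h)

theorem pvBal_paren {rest : List Char} (h : pvBal ('(' :: rest) = true) : ')' ∈ rest := by
  simp only [pvBal, Bool.and_eq_true, Bool.or_eq_true, decide_eq_true_eq,
    List.contains_eq_mem, ne_eq] at h
  rcases h.1 with h1 | h1
  · exact (h1 trivial).elim
  · exact h1

theorem dropWhile_mem_eq {rest : List Char} (h : ')' ∈ rest) :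
    rest.dropWhile (· ≠ ')') = ')' :: (rest.dropWhile (· ≠ ')')).tail := by
  induction rest with
  | nil => cases h
  | cons c cs ih =>
    by_cases hc : c = ')'
    · subst hc; simp [List.dropWhile]
    · rw [List.mem_cons] at h
      rcases h with h | h
      · exact absurd h.symm hc
      · simpa [List.dropWhile, hc] using ih h

-- B's loop while 'inside': consumes up to and including the first ')', flushing buf ++ key.
theorem stepB_inside (d : PySem.Dict String String) (rest : List Char) (h : ')' ∈ rest)
    (buf : List Char) (out : List (List Char)) :
    rest.foldl (pvStepB d) (true, buf, out) =
      ((rest.dropWhile (· ≠ ')')).tail).foldl (pvStepB d)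
        (false, [], out ++ [(d.getD (String.ofList (buf ++ rest.takeWhile (· ≠ ')'))) "?").toList]) := by
  induction rest generalizing buf with
  | nil => cases h
  | cons c cs ih =>
    by_cases hc : c = ')'
    · subst hc
      simp [List.foldl_cons, pvStepB, List.takeWhile, List.dropWhile]
    · rw [List.mem_cons] at h
      rcases h with h | h
      · exact absurd h.symm hc
      · have : pvStepB d (true, buf, out) c = (true, buf ++ [c], out) := by
          simp [pvStepB, hc]
        rw [List.foldl_cons, this, ih h]
        simp [List.takeWhile, List.dropWhile, hc]

-- Main loop invariant: outside a bracket, B's fold appends exactly A's result pieces.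
theorem loop_eq (d : PySem.Dict String String) :
    ∀ n (cs : List Char), cs.length ≤ n → pvBal cs = true → ∀ out : List (List Char),
      cs.foldl (pvStepB d) (false, [], out) = (false, [], out ++ pvLoopA d cs) := by
  intro n
  induction n with
  | zero =>
    intro cs hn _ out
    have : cs = [] := List.eq_nil_of_length_eq_zero (Nat.le_zero.mp hn)
    subst this; simp [pvLoopA]
  | succ n ih =>
    intro cs hn hbal out
    match cs with
    | [] => simp [pvLoopA]
    | c :: rest =>
      by_cases hc : c = '('
      · subst hc
        have hmem : ')' ∈ rest := pvBal_paren hbal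
        have hstep : pvStepB d (false, [], out) '(' = (true, [], out) := by
          simp [pvStepB]
        rw [List.foldl_cons, hstep, stepB_inside d rest hmem [] out]
        have hsplit : rest = rest.takeWhile (· ≠ ')') ++ (')' :: (rest.dropWhile (· ≠ ')')).tail) := by
          conv_lhs => rw [← List.takeWhile_append_dropWhile (p := (· ≠ ')')) (l := rest)]
          rw [← dropWhile_mem_eq hmem]
        have hbal' : pvBal ((rest.dropWhile (· ≠ ')')).tail) = true := by
          have : pvBal rest = true := pvBal_cons hbal
          rw [hsplit] at this
          exact pvBal_cons (pvBal_append this)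
        have hlen : ((rest.dropWhile (· ≠ ')')).tail).length ≤ n := by
          have h1 : (rest.dropWhile (· ≠ ')')).length ≤ rest.length := List.length_dropWhile_le _ _
          have h2 : ((rest.dropWhile (· ≠ ')')).tail).length = (rest.dropWhile (· ≠ ')')).length - 1 := List.length_tail
          simp only [List.length_cons] at hn; omega
        rw [ih _ hlen hbal']
        rw [pvLoopA]
        simp [hmem, List.append_assoc]
      · have hstep : pvStepB d (false, [], out) c = (false, [], out ++ [[c]]) := by
          simp [pvStepB, hc]
        rw [List.foldl_cons, hstep,
          ih rest (by simp only [List.length_cons] at hn; omega) (pvBal_cons hbal)]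
        rw [pvLoopA]
        simp [hc, List.append_assoc]

-- ===== VERDICT (by name: the statement is the Claim_ definition above) =====
theorem evaluate_spec : Claim_equal_evaluate := by
  intro s knowledge _ hpre
  unfold Spec_evaluate evaluate evaluate_alt
  have h := loop_eq (pvBuildDict knowledge) s.toList.length s.toList le_rfl hpre.2 []
  simp [h]
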